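-- pv_equiv track=rewrite | github.com/Marko-Obradovic/sigma-labs | level_1_challenge_4/the_office_2_boredom_score/boredom_score.py | calculate_boredom_score
-- ===== SOURCE A (Python) =====
-- def calculate_boredom_score(staff: dict[str, str]) -> int:
--     department_scores = {
--         "accounts": 1,
--         "finance": 2,
--         "canteen": 10,
--         "regulation": 3,
--         "trading": 6,
--         "change": 6,
--         "IS": 8,
--         "retail": 5,
--         "cleaning": 4,
--         "pissing about": 25
--     }
--
--     score_list = [
--         department_scores[department] for department in staff.values()
--         ]
--
--     added_values: int = sum(score_list)
--     return added_values
-- ===== SOURCE B (Python) =====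
-- def calculate_boredom_score(staff: dict[str, str]) -> int:
--     department_scores = {
--         "accounts": 1,
--         "finance": 2,
--         "canteen": 10,
--         "regulation": 3,
--         "trading": 6,
--         "change": 6,
--         "IS": 8,
--         "retail": 5,
--         "cleaning": 4,
--         "pissing about": 25
--     }
--
--     counts: dict[str, int] = {}
--     for department in staff.values():
--         counts[department] = counts.get(department, 0) + 1
--
--     return sum(c * department_scores[d] for d, c in counts.items())
-- ===== Notes on version B (the rewrite author's own statement) =====
-- stated objective: alternative
-- what changed: B first builds a frequency table of departments in one pass and then sums count*score over the distinct departments, instead of one score lookup per staff member summed directly.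
import Mathlib
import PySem

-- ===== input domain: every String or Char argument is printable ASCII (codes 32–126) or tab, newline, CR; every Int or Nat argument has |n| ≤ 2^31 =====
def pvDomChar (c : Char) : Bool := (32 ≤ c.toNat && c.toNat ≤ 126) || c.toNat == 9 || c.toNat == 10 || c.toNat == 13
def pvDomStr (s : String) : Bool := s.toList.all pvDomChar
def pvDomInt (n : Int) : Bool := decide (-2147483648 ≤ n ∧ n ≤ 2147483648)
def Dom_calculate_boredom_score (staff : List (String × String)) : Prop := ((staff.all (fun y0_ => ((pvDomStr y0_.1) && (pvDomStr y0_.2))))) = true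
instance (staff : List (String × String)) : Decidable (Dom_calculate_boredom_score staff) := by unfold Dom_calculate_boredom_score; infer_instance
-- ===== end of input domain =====

-- B replaces the per-employee score sum by a one-pass department frequency table summed as count*score over distinct departments.


-- the shared department_scores table (the identical dict literal in both Pythons)
def pvDeptScores : PySem.Dict String Int :=
  PySem.Dict.ofList
    [("accounts", 1), ("finance", 2), ("canteen", 10), ("regulation", 3), ("trading", 6),
     ("change", 6), ("IS", 8), ("retail", 5), ("cleaning", 4), ("pissing about", 25)]

-- ===== PORT A =====
-- A: score_list = one lookup per staff value, then sum.  department_scores[d] raises KeyError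
-- on an unknown department; getD 0 stands in only outside Pre_ (Pre_ excludes exactly those inputs).
def calculate_boredom_score (staff : List (String × String)) : Int :=
  let score_list := (PySem.Dict.ofList staff).values.map (fun department => pvDeptScores.getD department 0)
  score_list.sum

-- ===== PORT B =====
-- B: build a frequency dict of departments, then sum count * score over its items.
def calculate_boredom_score_alt (staff : List (String × String)) : Int :=
  let counts := (PySem.Dict.ofList staff).values.foldl
      (fun d department => d.insert department (d.getD department 0 + 1)) PySem.Dict.empty
  (counts.items.map (fun p => p.2 * pvDeptScores.getD p.1 0)).sum

-- ===== PRECONDITION & SPEC =====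
-- Pre_ excludes exactly the inputs on which Python A raises KeyError: some effective dict value
-- (last value for its key) is not one of the ten known departments.
def Pre_calculate_boredom_score (staff : List (String × String)) : Prop :=
  ∀ v ∈ (PySem.Dict.ofList staff).values,
    v ∈ ["accounts", "finance", "canteen", "regulation", "trading",
         "change", "IS", "retail", "cleaning", "pissing about"]
instance (staff : List (String × String)) : Decidable (Pre_calculate_boredom_score staff) := by
  unfold Pre_calculate_boredom_score; infer_instance

def pvWitness_calculate_boredom_score : (List (String × String)) :=
  [("jim", "accounts"), ("pam", "canteen"), ("dwight", "accounts")]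

def Spec_calculate_boredom_score (staff : List (String × String)) (out : Int) : Prop := out = calculate_boredom_score_alt staff
instance (staff : List (String × String)) (out : Int) : Decidable (Spec_calculate_boredom_score staff out) := by unfold Spec_calculate_boredom_score; infer_instance

-- ===== CLAIM (what is proved, stated in full; the proofs are below) =====
def Claim_equal_calculate_boredom_score : Prop := ∀ (staff : List (String × String)), Dom_calculate_boredom_score staff → Pre_calculate_boredom_score staff → Spec_calculate_boredom_score staff (calculate_boredom_score staff)

-- ===== LEMMAS AND PROOFS =====

-- summing f over the occurrences of x in a nodup list s picks out f x (or 0 if x ∉ s)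
lemma sum_map_ite_single (s : List String) (x : String) (f : String → Int)
    (hn : s.Nodup) (hx : x ∈ s) :
    (s.map (fun k => if k = x then f x else 0)).sum = f x := by
  induction s with
  | nil => cases hx
  | cons a s ih =>
    simp only [List.map_cons, List.sum_cons]
    rcases List.mem_cons.mp hx with h | h
    · have hnotin := (List.nodup_cons.mp hn).1
      have hzero : ∀ k ∈ s, (if k = x then f x else 0) = 0 := by
        intro k hk
        have : k ≠ x := fun e => hnotin (h ▸ e ▸ hk)
        simp [this]
      rw [← h, if_pos rfl, List.sum_eq_zero (by simpa using hzero)]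
      ring
    · have ha : a ≠ x := fun e => (List.nodup_cons.mp hn).1 (e ▸ h)
      rw [if_neg ha, ih (List.nodup_cons.mp hn).2 h]
      ring

-- Σ_{k ∈ s} (count of k in l) * f k = Σ_{v ∈ l} f v, for s nodup and covering l
lemma sum_count_mul (l : List String) (s : List String) (f : String → Int)
    (hn : s.Nodup) (hsub : ∀ y ∈ l, y ∈ s) :
    (s.map (fun k => (l.count k : Int) * f k)).sum = (l.map f).sum := by
  induction l with
  | nil => simp
  | cons x l ih =>
    have hsplit :
        (s.map (fun k => ((x :: l).count k : Int) * f k)).sum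
          = (s.map (fun k => (l.count k : Int) * f k)).sum
            + (s.map (fun k => if k = x then f x else 0)).sum := by
      rw [← PySem.List.sum_map_add_int]
      apply congrArg
      apply List.map_congr_left
      intro k _
      by_cases hk : k = x
      · subst hk; simp [List.count_cons_self]; ring
      · rw [List.count_cons_of_ne (fun e => hk e.symm)]
        simp [hk]
    rw [hsplit, ih (fun y hy => hsub y (List.mem_cons_of_mem _ hy)),
        sum_map_ite_single s x f hn (hsub x (List.mem_cons_self))]
    simp [add_comm]

-- ===== VERDICT (by name: the statement is the Claim_ definition above) =====
theorem calculate_boredom_score_spec : Claim_equal_calculate_boredom_score := by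
  intro staff _ _
  unfold Spec_calculate_boredom_score calculate_boredom_score calculate_boredom_score_alt
  simp only [PySem.Dict.foldl_insert_getD_add_one_eq_counter, PySem.Dict.items_counter,
      List.map_map]
  exact (sum_count_mul _ _ _ (PySem.Set.nodup_ofList _)
    (fun y hy => (PySem.Set.mem_ofList _ _).mpr hy)).symm
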